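-- pv_equiv track=rewrite | github.com/Rishabhrv/bookledger | pages/tasks.py | get_week_checklist_status
-- ===== SOURCE A (Python) =====
-- def get_week_checklist_status(week_dates, daily_summary):
--     """Determines the aggregated status for a week of checklists."""
--     statuses = [daily_summary[d]['status'] for d in week_dates if d in daily_summary]
--     if not statuses:
--         return None
--     if 'rejected' in statuses:
--         return 'rejected'
--     if 'started' in statuses:
--         return 'started'
--     if 'submitted' in statuses:
--         return 'submitted'
--     if all(s == 'approved' for s in statuses):
--         return 'approved'
--     return 'pending'
-- ===== SOURCE B (Python) =====
-- def get_week_checklist_status(week_dates, daily_summary):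
--     """Single pass over week_dates maintaining flags; no intermediate statuses list."""
--     any_seen = saw_rejected = saw_started = saw_submitted = False
--     all_approved = True
--     for d in week_dates:
--         if d in daily_summary:
--             s = daily_summary[d]['status']
--             any_seen = True
--             saw_rejected = saw_rejected or s == 'rejected'
--             saw_started = saw_started or s == 'started'
--             saw_submitted = saw_submitted or s == 'submitted'
--             all_approved = all_approved and s == 'approved'
--     if not any_seen:
--         return None
--     if saw_rejected:
--         return 'rejected'
--     if saw_started:
--         return 'started'
--     if saw_submitted:
--         return 'submitted'
--     if all_approved:
--         return 'approved'
--     return 'pending'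
-- ===== Notes on version B (the rewrite author's own statement) =====
-- stated objective: simpler
-- what changed: Replaces the materialised statuses list plus four rescans (three membership tests and an all()) with a single loop over week_dates that maintains boolean flags and decides the result once at the end.
import Mathlib
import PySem

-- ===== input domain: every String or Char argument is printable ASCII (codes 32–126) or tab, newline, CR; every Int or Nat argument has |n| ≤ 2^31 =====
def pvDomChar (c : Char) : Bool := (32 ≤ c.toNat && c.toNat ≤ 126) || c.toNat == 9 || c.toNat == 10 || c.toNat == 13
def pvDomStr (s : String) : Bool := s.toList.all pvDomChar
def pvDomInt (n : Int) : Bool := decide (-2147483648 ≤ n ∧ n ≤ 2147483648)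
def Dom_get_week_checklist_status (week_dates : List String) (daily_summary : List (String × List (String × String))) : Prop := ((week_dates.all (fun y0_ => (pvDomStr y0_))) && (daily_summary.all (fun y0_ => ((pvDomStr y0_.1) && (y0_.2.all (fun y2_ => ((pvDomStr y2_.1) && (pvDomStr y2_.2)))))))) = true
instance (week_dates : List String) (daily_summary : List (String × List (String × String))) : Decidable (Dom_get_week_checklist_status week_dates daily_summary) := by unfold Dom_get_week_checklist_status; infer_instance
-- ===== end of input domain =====

-- B replaces the statuses list plus four rescans by a single flag-maintaining loop (objective: simpler).

-- ===== PORT A =====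
-- daily_summary[d]['status']: on Pre_ the inner key "status" is present, so getD's default is never used.
def get_week_checklist_status (week_dates : List String) (daily_summary : List (String × List (String × String))) : Option String :=
  let statuses := week_dates.filterMap (fun d =>
    (List.lookup d daily_summary).map (fun inner => (List.lookup "status" inner).getD ""))
  if statuses = [] then none
  else if statuses.contains "rejected" then some "rejected"
  else if statuses.contains "started" then some "started"
  else if statuses.contains "submitted" then some "submitted"
  else if statuses.all (· == "approved") then some "approved"
  else some "pending"

-- ===== PORT B =====
-- state = (any_seen, saw_rejected, saw_started, saw_submitted, all_approved)
def pvAltStep (daily_summary : List (String × List (String × String)))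
    (st : Bool × Bool × Bool × Bool × Bool) (d : String) : Bool × Bool × Bool × Bool × Bool :=
  match List.lookup d daily_summary with
  | none => st
  | some inner =>
    let s := (List.lookup "status" inner).getD ""
    (true, st.2.1 || s == "rejected", st.2.2.1 || s == "started",
     st.2.2.2.1 || s == "submitted", st.2.2.2.2 && s == "approved")

def get_week_checklist_status_alt (week_dates : List String) (daily_summary : List (String × List (String × String))) : Option String :=
  let fl := week_dates.foldl (pvAltStep daily_summary) (false, false, false, false, true)
  if !fl.1 then none
  else if fl.2.1 then some "rejected"
  else if fl.2.2.1 then some "started"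
  else if fl.2.2.2.1 then some "submitted"
  else if fl.2.2.2.2 then some "approved"
  else some "pending"

-- ===== PRECONDITION & SPEC =====
-- Pre_ excludes exactly the inputs where Python A raises KeyError: some week date present in
-- daily_summary whose inner dict lacks the key 'status'.
def Pre_get_week_checklist_status (week_dates : List String) (daily_summary : List (String × List (String × String))) : Prop :=
  (week_dates.all (fun d =>
    (List.lookup d daily_summary).all (fun inner => inner.any (fun p => p.1 == "status")))) = true
instance (week_dates : List String) (daily_summary : List (String × List (String × String))) : Decidable (Pre_get_week_checklist_status week_dates daily_summary) := by unfold Pre_get_week_checklist_status; infer_instance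

def pvWitness_get_week_checklist_status : List String × (List (String × List (String × String))) :=
  (["d1", "d2"], [("d1", [("status", "approved")])])

def Spec_get_week_checklist_status (week_dates : List String) (daily_summary : List (String × List (String × String))) (out : Option String) : Prop := out = get_week_checklist_status_alt week_dates daily_summary
instance (week_dates : List String) (daily_summary : List (String × List (String × String))) (out : Option String) : Decidable (Spec_get_week_checklist_status week_dates daily_summary out) := by unfold Spec_get_week_checklist_status; infer_instance

-- ===== CLAIM (what is proved, stated in full; the proofs are below) =====
def Claim_equal_get_week_checklist_status : Prop := ∀ (week_dates : List String) (daily_summary : List (String × List (String × String))), Dom_get_week_checklist_status week_dates daily_summary → Pre_get_week_checklist_status week_dates daily_summary → Spec_get_week_checklist_status week_dates daily_summary (get_week_checklist_status week_dates daily_summary)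

-- ===== LEMMAS AND PROOFS =====

-- the statuses list built by A
def pvStatuses (week_dates : List String) (daily_summary : List (String × List (String × String))) : List String :=
  week_dates.filterMap (fun d =>
    (List.lookup d daily_summary).map (fun inner => (List.lookup "status" inner).getD ""))

theorem pvBeqDec (a b : String) : (a == b) = decide (a = b) := Bool.beq_eq_decide_eq a b

theorem pvDecComm (a b : String) : decide (a = b) = decide (b = a) := by
  rw [decide_eq_decide]; exact eq_comm

-- B's fold computes exactly the five scans over A's statuses list
theorem pvFold_char (daily_summary : List (String × List (String × String))) :
    ∀ (wd : List String) (a r t u p : Bool),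
      wd.foldl (pvAltStep daily_summary) (a, r, t, u, p) =
        (a || !(pvStatuses wd daily_summary).isEmpty,
         r || (pvStatuses wd daily_summary).contains "rejected",
         t || (pvStatuses wd daily_summary).contains "started",
         u || (pvStatuses wd daily_summary).contains "submitted",
         p && (pvStatuses wd daily_summary).all (· == "approved")) := by
  intro wd
  induction wd with
  | nil => intro a r t u p; simp [pvStatuses]
  | cons d wd ih =>
    intro a r t u p
    simp only [List.foldl_cons, pvAltStep, pvStatuses, List.filterMap_cons]
    cases h : List.lookup d daily_summary with
    | none => simpa [pvStatuses] using ih a r t u p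
    | some inner =>
      simp only [Option.map_some]
      rw [ih]
      simp [pvStatuses, Bool.or_assoc, Bool.and_assoc, pvBeqDec, pvDecComm]

theorem get_week_checklist_status_eq (week_dates : List String)
    (daily_summary : List (String × List (String × String))) :
    get_week_checklist_status week_dates daily_summary =
      get_week_checklist_status_alt week_dates daily_summary := by
  unfold get_week_checklist_status get_week_checklist_status_alt
  rw [pvFold_char]
  simp only [Bool.false_or, Bool.true_and, Bool.not_not]
  cases hs : pvStatuses week_dates daily_summary with
  | nil =>
    simp only [pvStatuses] at hs
    simp [hs]
  | cons x xs =>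
    simp only [pvStatuses] at hs
    simp [hs]

-- ===== VERDICT (by name: the statement is the Claim_ definition above) =====
theorem get_week_checklist_status_spec : Claim_equal_get_week_checklist_status := by
  intro wd ds _ _
  unfold Spec_get_week_checklist_status
  exact get_week_checklist_status_eq wd ds
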